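-- pv_equiv track=rewrite | github.com/SouzaDiog0/trabalhoAV2-CCA | Comparar.py | comparar_palavras
-- ===== SOURCE A (Python) =====
-- def comparar_palavras(a, b):
--     fita_a = list(a)
--     fita_b = list(b)
--
--     for char_a, char_b in zip(fita_a, fita_b):
--         if char_a < char_b:
--             return b
--         elif char_a > char_b:
--             return a
--
--     if len(fita_a) < len(fita_b):
--         return b
--     elif len(fita_a) > len(fita_b):
--         return a
--
--     return "iguais"
-- ===== SOURCE B (Python) =====
-- def comparar_palavras(a, b):
--     fita_a = list(a)
--     fita_b = list(b)
--     if fita_b < fita_a: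
--         return a
--     elif fita_a < fita_b:
--         return b
--     return "iguais"
-- ===== Notes on version B (the rewrite author's own statement) =====
-- stated objective: idiomatic
-- what changed: Replaces the explicit zip loop with early returns plus the two length checks by a single built-in lexicographic list comparison (Python's C-level list ordering already encodes the per-character scan and the length tie-break).
import Mathlib
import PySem

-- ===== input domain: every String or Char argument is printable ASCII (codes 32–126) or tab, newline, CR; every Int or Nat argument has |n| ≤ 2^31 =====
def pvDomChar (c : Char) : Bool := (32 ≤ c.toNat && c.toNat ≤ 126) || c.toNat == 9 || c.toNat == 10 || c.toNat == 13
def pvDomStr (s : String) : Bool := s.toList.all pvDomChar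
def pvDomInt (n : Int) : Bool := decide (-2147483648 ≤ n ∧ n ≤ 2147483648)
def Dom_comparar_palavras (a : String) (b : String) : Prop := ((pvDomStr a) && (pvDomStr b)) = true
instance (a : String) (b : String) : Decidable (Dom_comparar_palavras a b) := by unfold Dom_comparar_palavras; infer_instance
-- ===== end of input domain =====

-- B replaces A's explicit zip loop and length checks by one built-in lexicographic list comparison (idiomatic; same cost).


-- ===== PORT A =====
-- the zip loop with its two early returns: some r = early return, none = loop fell through
def comparar_palavras_zipLoop (a : String) (b : String) : List (Char × Char) → Option String
  | [] => none
  | (ca, cb) :: rest =>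
      if ca < cb then some b
      else if cb < ca then some a
      else comparar_palavras_zipLoop a b rest

def comparar_palavras (a : String) (b : String) : String :=
  let fita_a := a.toList
  let fita_b := b.toList
  match comparar_palavras_zipLoop a b (fita_a.zip fita_b) with
  | some r => r
  | none =>
      if fita_a.length < fita_b.length then b
      else if fita_b.length < fita_a.length then a
      else "iguais"

-- ===== PORT B =====
-- Python's built-in list `<` (lexicographic, shorter-prefix is smaller), as Source B calls it
def pyListLtChar : List Char → List Char → Bool
  | _, [] => false
  | [], _ :: _ => true
  | x :: xs, y :: ys =>
      if x < y then true
      else if y < x then false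
      else pyListLtChar xs ys

def comparar_palavras_alt (a : String) (b : String) : String :=
  let fita_a := a.toList
  let fita_b := b.toList
  if pyListLtChar fita_b fita_a then a
  else if pyListLtChar fita_a fita_b then b
  else "iguais"

-- ===== PRECONDITION & SPEC =====
def Spec_comparar_palavras (a : String) (b : String) (out : String) : Prop := out = comparar_palavras_alt a b
instance (a : String) (b : String) (out : String) : Decidable (Spec_comparar_palavras a b out) := by unfold Spec_comparar_palavras; infer_instance

-- ===== CLAIM (what is proved, stated in full; the proofs are below) =====
def Claim_equal_comparar_palavras : Prop := ∀ (a : String) (b : String), Dom_comparar_palavras a b → Spec_comparar_palavras a b (comparar_palavras a b)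

-- ===== LEMMAS AND PROOFS =====
theorem comparar_palavras_key (a b : String) (xs ys : List Char) :
    (match comparar_palavras_zipLoop a b (xs.zip ys) with
     | some r => r
     | none =>
         if xs.length < ys.length then b
         else if ys.length < xs.length then a
         else "iguais") =
    (if pyListLtChar ys xs then a
     else if pyListLtChar xs ys then b
     else "iguais") := by
  induction xs generalizing ys with
  | nil =>
      cases ys with
      | nil => simp [comparar_palavras_zipLoop, pyListLtChar]
      | cons y ys => simp [comparar_palavras_zipLoop, pyListLtChar]
  | cons x xs ih =>
      cases ys with
      | nil => simp [comparar_palavras_zipLoop, pyListLtChar]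
      | cons y ys =>
          by_cases hxy : x < y
          · have hyx : ¬ y < x := lt_asymm hxy
            simp [comparar_palavras_zipLoop, pyListLtChar, hxy, hyx]
          · by_cases hyx : y < x
            · simp [comparar_palavras_zipLoop, pyListLtChar, hxy, hyx]
            · simp [comparar_palavras_zipLoop, pyListLtChar, hxy, hyx]
              exact ih ys

-- ===== VERDICT (by name: the statement is the Claim_ definition above) =====
theorem comparar_palavras_spec : Claim_equal_comparar_palavras := by
  intro a b _
  unfold Spec_comparar_palavras comparar_palavras comparar_palavras_alt
  exact comparar_palavras_key a b a.toList b.toList
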